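-- pv_equiv track=rewrite | github.com/arulana/portfolioevolution | src/portfolio_evolution/utils/transforms.py | normalize_segment_key
-- ===== SOURCE A (Python) =====
-- def normalize_segment_key(segment: str | None) -> str | None:
--     """Normalize a segment name to a clean YAML-safe config key.
--
--     Handles Karen's industry sector names (e.g. 'Admin & Waste Mgmt')
--     and legacy lending categories (e.g. 'cre', 'C&I').
--     """
--     if not segment:
--         return None
--     key = segment.lower().strip()
--     key = key.replace("&", "_and_")
--     key = key.replace(" ", "_")
--     while "__" in key:
--         key = key.replace("__", "_")
--     return key.strip("_")
-- ===== SOURCE B (Python) =====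
-- def normalize_segment_key(segment):
--     """Single left-to-right scan with a pending-separator flag: no replace
--     chains, no collapse loop, no final strip."""
--     if not segment:
--         return None
--     out = []
--     pending = False
--     for ch in segment.lower().strip():
--         if ch == " " or ch == "_":
--             if out:
--                 pending = True
--         elif ch == "&":
--             if out:
--                 out.append("_")
--             out.append("and")
--             pending = True
--         else:
--             if pending:
--                 out.append("_")
--                 pending = False
--             out.append(ch)
--     return "".join(out)
-- ===== Notes on version B (the rewrite author's own statement) =====
-- stated objective: alternative
-- what changed: Replaces A's replace chain, repeated double-underscore-collapsing while loop and final underscore strip with a single left-to-right character scan: a pending-separator state machine that emits tokens (treating '&' as an 'and' token) with exactly one underscore between them.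
import Mathlib
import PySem

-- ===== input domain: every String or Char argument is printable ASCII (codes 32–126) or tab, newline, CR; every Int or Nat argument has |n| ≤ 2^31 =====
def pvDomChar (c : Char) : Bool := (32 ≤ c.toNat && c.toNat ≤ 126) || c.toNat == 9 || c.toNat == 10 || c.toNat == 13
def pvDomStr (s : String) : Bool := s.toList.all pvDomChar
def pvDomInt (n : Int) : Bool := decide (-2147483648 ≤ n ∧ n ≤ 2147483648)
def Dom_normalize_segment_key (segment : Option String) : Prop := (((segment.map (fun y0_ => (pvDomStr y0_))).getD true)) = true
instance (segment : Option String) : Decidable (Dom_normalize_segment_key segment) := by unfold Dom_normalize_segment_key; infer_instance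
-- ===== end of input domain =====

-- B replaces A's replace chain, double-underscore-collapsing while loop and final underscore strip
-- by a single left-to-right character scan with a pending-separator flag (alternative decomposition).


-- ===== PORT A =====
-- rep1 and the lemmas up to `replace_uu_length_lt` exist only because the port's
-- while-loop `collapseLoopA` cites `replace_uu_length_lt` by name for termination.
def rep1 : List Char → List Char
  | [] => []
  | [c] => [c]
  | c :: d :: t => if c = '_' ∧ d = '_' then '_' :: rep1 t else c :: rep1 (d :: t)

theorem go_eq_rep1 : ∀ (fuel : Nat) (l acc : List Char), l.length ≤ fuel →
    PySem.Chars.replace.go ['_','_'] ['_'] fuel l acc = acc.reverse ++ rep1 l := by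
  intro fuel
  induction fuel with
  | zero => intro l acc h; simp at h; simp [h, PySem.Chars.replace.go, rep1]
  | succ n ih =>
    intro l acc h
    match l with
    | [] => simp [PySem.Chars.replace.go, rep1]
    | [c] =>
        rw [PySem.Chars.replace.go]
        have hp : List.isPrefixOf ['_','_'] [c] = false := by simp [List.isPrefixOf]
        rw [hp]
        rw [if_neg (by simp)]
        rw [ih [] (c::acc) (by simp)]
        simp [rep1]
    | c :: d :: t =>
        rw [PySem.Chars.replace.go]
        by_cases hcd : c = '_' ∧ d = '_'
        · obtain ⟨hc, hd⟩ := hcd; subst hc; subst hd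
          have hp : List.isPrefixOf ['_','_'] ('_'::'_'::t) = true := by simp [List.isPrefixOf]
          rw [hp]; rw [if_pos rfl]
          show PySem.Chars.replace.go ['_','_'] ['_'] n (List.drop 2 ('_'::'_'::t)) (['_'].reverse ++ acc) = _
          simp only [List.drop_succ_cons, List.drop_zero, List.reverse_singleton, List.singleton_append]
          rw [ih t ('_'::acc) (by simp at h ⊢; omega)]
          simp [rep1]
        · have hp : List.isPrefixOf ['_','_'] (c::d::t) = false := by
            rcases not_and_or.mp hcd with h' | h'
            · simp only [List.isPrefixOf, Bool.and_eq_false_iff, beq_eq_false_iff_ne, ne_eq]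
              left; exact fun he => h' he.symm
            · simp only [List.isPrefixOf, Bool.and_eq_false_iff, beq_eq_false_iff_ne, ne_eq]
              right; left; exact fun he => h' he.symm
          rw [hp]; rw [if_neg (by simp)]
          rw [ih (d::t) (c::acc) (by simp at h ⊢; omega)]
          simp [rep1, hcd]

theorem replace_uu (l : List Char) : PySem.Chars.replace l ['_','_'] ['_'] = rep1 l := by
  rw [PySem.Chars.replace]
  rw [if_neg (by simp)]
  rw [go_eq_rep1 l.length l [] le_rfl]
  simp

theorem rep1_length_le (l : List Char) : (rep1 l).length ≤ l.length := by
  induction l using rep1.induct with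
  | case1 => simp [rep1]
  | case2 c => simp [rep1]
  | case3 c d t h ih => simp only [rep1, if_pos h]; simp at ih ⊢; omega
  | case4 c d t h ih => simp only [rep1, if_neg h]; simp at ih ⊢; omega

theorem rep1_length_lt (l : List Char) (h : ['_','_'] <:+: l) : (rep1 l).length < l.length := by
  induction l using rep1.induct with
  | case1 => simp at h
  | case2 c =>
      exfalso
      obtain ⟨a, b, hab⟩ := h
      have := congrArg List.length hab
      simp at this; omega
  | case3 c d t hcd ih =>
      simp only [rep1, if_pos hcd]
      have := rep1_length_le t
      simp at this ⊢; omega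
  | case4 c d t hcd ih =>
      simp only [rep1, if_neg hcd]
      have h2 : ['_','_'] <:+: (d :: t) := by
        rcases (List.infix_cons_iff).mp h with hp | hi
        · exfalso
          rcases hp with ⟨r, hr⟩
          simp at hr
          exact hcd ⟨hr.1.symm, hr.2.1.symm⟩
        · exact hi
      have := ih h2
      simp at this ⊢; omega

theorem replace_uu_length_lt (l : List Char) (h : PySem.Chars.isIn ['_','_'] l = true) :
    (PySem.Chars.replace l ['_','_'] ['_']).length < l.length := by
  rw [replace_uu]
  exact rep1_length_lt l ((PySem.Chars.isIn_iff_infix _ _).mp h)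

-- A's while loop that collapses repeated underscores until none remain
def collapseLoopA (key : List Char) : List Char :=
  if h : PySem.Chars.isIn ['_','_'] key then
    collapseLoopA (PySem.Chars.replace key ['_','_'] ['_'])
  else key
termination_by key.length
decreasing_by exact replace_uu_length_lt key h

def normalize_segment_key (segment : Option String) : Option String :=
  match segment with
  | none => none
  | some s =>
    if s = "" then none
    else
      let key := PySem.Chars.strip (PySem.Chars.lower s.toList)
      let key := PySem.Chars.replace key ['&'] ['_','a','n','d','_']
      let key := PySem.Chars.replace key [' '] ['_']
      let key := collapseLoopA key
      some (String.ofList (PySem.Chars.stripChars key ['_']))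

-- ===== PORT B =====
def bstep (st : List Char × Bool) (c : Char) : List Char × Bool :=
  if c = ' ' ∨ c = '_' then
    (st.1, if st.1.isEmpty then st.2 else true)
  else if c = '&' then
    ((if st.1.isEmpty then st.1 else st.1 ++ ['_']) ++ ['a','n','d'], true)
  else
    ((if st.2 then st.1 ++ ['_'] else st.1) ++ [c], false)

def normalize_segment_key_alt (segment : Option String) : Option String :=
  match segment with
  | none => none
  | some s =>
    if s = "" then none
    else
      let st := (PySem.Chars.strip (PySem.Chars.lower s.toList)).foldl bstep ([], false)
      some (String.ofList st.1)

-- ===== PRECONDITION & SPEC =====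
def Spec_normalize_segment_key (segment : Option String) (out : Option String) : Prop := out = normalize_segment_key_alt segment
instance (segment : Option String) (out : Option String) : Decidable (Spec_normalize_segment_key segment out) := by unfold Spec_normalize_segment_key; infer_instance

-- ===== CLAIM =====
def Claim_equal_normalize_segment_key : Prop := ∀ (segment : Option String), Dom_normalize_segment_key segment → Spec_normalize_segment_key segment (normalize_segment_key segment)

-- ===== LEMMAS AND PROOFS =====
inductive MSt | e | n | p
deriving DecidableEq, Repr

def mf : MSt → List Char → List Char
  | _, [] => []
  | .e, c :: t => if c = '_' then mf .e t else c :: mf .n t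
  | .n, c :: t => if c = '_' then mf .p t else c :: mf .n t
  | .p, c :: t => if c = '_' then mf .p t else '_' :: c :: mf .n t

theorem mf_rep1 (l : List Char) : ∀ s, mf s (rep1 l) = mf s l := by
  induction l using rep1.induct with
  | case1 => intro s; rfl
  | case2 c => intro s; rfl
  | case3 c d t h ih =>
      obtain ⟨hc, hd⟩ := h; subst hc; subst hd
      intro s
      simp only [rep1, if_pos (⟨rfl, rfl⟩ : '_' = '_' ∧ '_' = '_')]
      cases s <;> simp [mf, ih]
  | case4 c d t h ih =>
      intro s
      simp only [rep1, if_neg h]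
      by_cases hc : c = '_' <;> cases s <;> simp [mf, hc, ih]

def qU : Char → Bool := fun c => (['_'] : List Char).contains c

def ruf (l : List Char) : List Char := (List.dropWhile qU l.reverse).reverse

theorem ruf_cons (c : Char) (t : List Char) :
    ruf (c :: t) = if ruf t = [] then (if qU c then [] else [c]) else c :: ruf t := by
  unfold ruf
  simp only [List.reverse_cons]
  rw [List.dropWhile_append]
  by_cases h : List.dropWhile qU t.reverse = []
  · simp [h]
    by_cases hq : qU c <;> simp [List.dropWhile, hq]
  · rw [if_neg (by simpa using h)]
    rw [if_neg ?_]
    · simp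
    · intro hh
      exact h (by simpa using congrArg List.reverse hh)

theorem infix_uu_tail {c : Char} {t : List Char} (h : ¬ ['_','_'] <:+: c :: t) :
    ¬ ['_','_'] <:+: t := fun hi => h (hi.trans (List.suffix_cons c t).isInfix)

theorem mf_n_eq_ruf : ∀ (l : List Char), ¬ ['_','_'] <:+: l → mf .n l = ruf l := by
  intro l
  induction hn : l.length using Nat.strong_induction_on generalizing l with
  | _ n ih =>
  match l with
  | [] => intro _; rfl
  | c :: t =>
    intro h
    by_cases hc : c = '_'
    · subst hc
      match t with
      | [] => rfl
      | c2 :: t2 =>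
        have hc2 : c2 ≠ '_' := by
          intro he; subst he
          exact h ⟨[], t2, rfl⟩
        have h2 : ¬ ['_','_'] <:+: t2 := infix_uu_tail (infix_uu_tail h)
        have hmf : mf .n ('_' :: c2 :: t2) = '_' :: c2 :: mf .n t2 := by
          simp [mf, hc2]
        rw [hmf, ih t2.length (by subst hn; simp) t2 rfl h2]
        rw [ruf_cons, ruf_cons]
        have : ¬ (if ruf t2 = [] then (if qU c2 then [] else [c2]) else c2 :: ruf t2) = [] := by
          by_cases hrt : ruf t2 = [] <;> simp [hrt, qU, hc2]
        rw [if_neg this]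
        by_cases hrt : ruf t2 = [] <;> simp [hrt, qU, hc2]
    · have hmf : mf .n (c :: t) = c :: mf .n t := by simp [mf, hc]
      rw [hmf, ih t.length (by subst hn; simp) t rfl (infix_uu_tail h), ruf_cons]
      by_cases hrt : ruf t = [] <;> simp [hrt, qU, hc]

theorem mf_e_dropWhile (l : List Char) : mf .e l = mf .e (List.dropWhile qU l) := by
  induction l with
  | nil => rfl
  | cons c t ih =>
      by_cases hc : c = '_'
      · subst hc; simpa [mf, List.dropWhile, qU] using ih
      · simp [mf, List.dropWhile, qU, hc]

theorem stripChars_eq_mf_e (l : List Char) (h : ¬ ['_','_'] <:+: l) :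
    PySem.Chars.stripChars l ['_'] = mf .e l := by
  have hstrip : PySem.Chars.stripChars l ['_'] = ruf (List.dropWhile qU l) := rfl
  rw [hstrip, mf_e_dropWhile]
  have hsub : ¬ ['_','_'] <:+: List.dropWhile qU l :=
    fun hi => h (hi.trans (List.dropWhile_suffix qU).isInfix)
  match hd : List.dropWhile qU l with
  | [] => rfl
  | c :: m =>
    have hc : c ≠ '_' := by
      intro he; subst he
      have := List.head?_dropWhile_not qU l
      rw [hd] at this
      simp [qU] at this
    rw [hd] at hsub
    have hmf : mf .e (c :: m) = c :: mf .n m := by simp [mf, hc]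
    rw [hmf, ruf_cons, mf_n_eq_ruf m (infix_uu_tail hsub)]
    by_cases hrt : ruf m = [] <;> simp [hrt, qU, hc]

theorem collapseLoopA_eq_mf_e : ∀ (l : List Char),
    PySem.Chars.stripChars (collapseLoopA l) ['_'] = mf .e l := by
  intro l
  induction hn : l.length using Nat.strong_induction_on generalizing l with
  | _ n ih =>
  rw [collapseLoopA]
  by_cases h : PySem.Chars.isIn ['_','_'] l = true
  · rw [dif_pos h, replace_uu]
    have hlt : (rep1 l).length < l.length := rep1_length_lt l ((PySem.Chars.isIn_iff_infix _ _).mp h)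
    rw [ih (rep1 l).length (by omega) (rep1 l) rfl]
    exact mf_rep1 l .e
  · rw [dif_neg h]
    exact stripChars_eq_mf_e l ((PySem.Chars.isIn_eq_false_iff _ _).mp (by simpa using h))

def phiAmp (c : Char) : List Char := if c = '&' then ['_','a','n','d','_'] else [c]
def phiSp (c : Char) : List Char := if c = ' ' then ['_'] else [c]
def phi (c : Char) : List Char :=
  if c = '&' then ['_','a','n','d','_'] else if c = ' ' then ['_'] else [c]

theorem goc_eq_flatMap (a : Char) (new : List Char) :
    ∀ (fuel : Nat) (l acc : List Char), l.length ≤ fuel →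
    PySem.Chars.replace.go [a] new fuel l acc =
      acc.reverse ++ l.flatMap (fun c => if c = a then new else [c]) := by
  intro fuel
  induction fuel with
  | zero => intro l acc h; simp at h; simp [h, PySem.Chars.replace.go]
  | succ n ih =>
    intro l acc h
    match l with
    | [] => simp [PySem.Chars.replace.go]
    | c :: t =>
      rw [PySem.Chars.replace.go]
      by_cases hc : c = a
      · subst hc
        have hp : List.isPrefixOf [c] (c :: t) = true := by simp [List.isPrefixOf]
        rw [hp, if_pos rfl]
        show PySem.Chars.replace.go [c] new n (List.drop 1 (c :: t)) (new.reverse ++ acc) = _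
        simp only [List.drop_succ_cons, List.drop_zero]
        rw [ih t (new.reverse ++ acc) (by simp at h; omega)]
        simp
      · have hp : List.isPrefixOf [a] (c :: t) = false := by
          simp only [List.isPrefixOf, Bool.and_eq_false_iff, beq_eq_false_iff_ne, ne_eq]
          left; exact fun he => hc he.symm
        rw [hp, if_neg (by simp)]
        rw [ih t (c :: acc) (by simp at h; omega)]
        simp [hc]

theorem replace_single (l : List Char) (a : Char) (new : List Char) :
    PySem.Chars.replace l [a] new = l.flatMap (fun c => if c = a then new else [c]) := by
  rw [PySem.Chars.replace, if_neg (by simp), goc_eq_flatMap a new l.length l [] le_rfl]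
  simp

theorem flatMap_phi (l : List Char) :
    (l.flatMap phiAmp).flatMap phiSp = l.flatMap phi := by
  induction l with
  | nil => rfl
  | cons c t ih =>
    simp only [List.flatMap_cons, List.flatMap_append, ih]
    congr 1
    by_cases h1 : c = '&'
    · subst h1; rfl
    · by_cases h2 : c = ' '
      · subst h2; rfl
      · simp [phiAmp, phiSp, phi, h1, h2]

def stOf (out : List Char) (pending : Bool) : MSt :=
  if out.isEmpty then .e else if pending then .p else .n

theorem sim : ∀ (t : List Char) (out : List Char) (pending : Bool),
    (out.isEmpty = true → pending = false) →
    (List.foldl bstep (out, pending) t).1 = out ++ mf (stOf out pending) (t.flatMap phi) := by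
  intro t
  induction t with
  | nil => intro out pending _; cases h : stOf out pending <;> simp [mf]
  | cons c r ih =>
    intro out pending hinv
    rw [List.foldl_cons]
    by_cases hsp : c = ' ' ∨ c = '_'
    · have hb : bstep (out, pending) c = (out, if out.isEmpty then pending else true) := by
        simp [bstep, hsp]
      have hphi : phi c = ['_'] := by
        rcases hsp with h | h <;> subst h <;> rfl
      rw [hb, List.flatMap_cons, hphi]
      by_cases ho : out.isEmpty
      · have hp0 : pending = false := hinv ho
        subst hp0
        rw [if_pos ho, ih out false hinv]
        simp only [stOf, if_pos ho]
        simp [mf]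
      · rw [if_neg ho, ih out true (by intro hh; exact absurd hh ho)]
        simp only [stOf, if_neg ho]
        by_cases hp : pending <;> simp [hp, mf]
    · push_neg at hsp
      by_cases hamp : c = '&'
      · subst hamp
        have hb : bstep (out, pending) '&' =
            ((if out.isEmpty then out else out ++ ['_']) ++ ['a','n','d'], true) := by
          simp [bstep]
        rw [hb, List.flatMap_cons, show phi '&' = ['_','a','n','d','_'] from rfl]
        by_cases ho : out.isEmpty
        · have hp0 : pending = false := hinv ho
          subst hp0
          have ho' : out = [] := by simpa using ho
          subst ho'
          rw [if_pos ho]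
          rw [ih (([] : List Char) ++ ['a','n','d']) true (by simp)]
          simp [stOf, mf]
        · rw [if_neg ho]
          rw [ih ((out ++ ['_']) ++ ['a','n','d']) true (by simp)]
          simp only [stOf, if_neg ho]
          by_cases hp : pending <;> simp [hp, mf, hsp.2]
      · have hb : bstep (out, pending) c =
            ((if pending then out ++ ['_'] else out) ++ [c], false) := by
          simp [bstep, hsp, hamp]
        rw [hb, List.flatMap_cons, show phi c = [c] by simp [phi, hamp, hsp.1]]
        by_cases hp : pending
        · have ho : out.isEmpty = false := by
            by_contra hh
            exact absurd (hinv (by simpa using hh)) (by simpa using hp)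
          rw [if_pos hp, ih ((out ++ ['_']) ++ [c]) false (by simp)]
          simp only [stOf, ho, if_neg (by simp : ¬ (((out ++ ['_']) ++ [c]).isEmpty = true))]
          simp [hp, mf, hsp.2]
        · rw [if_neg hp, ih (out ++ [c]) false (by simp)]
          simp only [stOf]
          by_cases ho : out.isEmpty <;> simp [ho, hp, mf, hsp.2]

-- ===== VERDICT =====
theorem normalize_segment_key_spec : Claim_equal_normalize_segment_key := by
  unfold Claim_equal_normalize_segment_key Spec_normalize_segment_key
  intro segment _
  match segment with
  | none => rfl
  | some s =>
    unfold normalize_segment_key normalize_segment_key_alt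
    by_cases hs : s = ""
    · simp [hs]
    · simp only [if_neg hs]
      rw [replace_single, replace_single]
      rw [show (fun c => if c = '&' then ['_','a','n','d','_'] else [c]) = phiAmp from rfl]
      rw [show (fun c => if c = ' ' then ['_'] else [c]) = phiSp from rfl]
      rw [flatMap_phi, collapseLoopA_eq_mf_e]
      rw [sim (PySem.Chars.strip (PySem.Chars.lower s.toList)) [] false (by simp)]
      simp [stOf]
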